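-- pv_equiv track=rewrite | github.com/miguel76/dna-repeat-discovery | distanceMatrix.py | normalize_loop
-- ===== SOURCE A (Python) =====
-- def normalize_loop(loop_seq):
--     def invert_pos(pos):
--         return len(loop_seq) - pos if pos > 0 else 0
--     options = []
--     for start_index in range(len(loop_seq)):
--         options.append(loop_seq[start_index:] + loop_seq[:start_index] + [start_index])
--     options.sort()
--     return (options[0][:-1],invert_pos(options[0][-1]))
-- ===== SOURCE B (Python) =====
-- def normalize_loop(loop_seq):
--     n = len(loop_seq)
--     best_i, best = 0, loop_seq
--     for i in range(1, n):
--         cand = loop_seq[i:] + loop_seq[:i]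
--         if cand < best:
--             best_i, best = i, cand
--     return (best, n - best_i if best_i > 0 else 0)
-- ===== Notes on version B (the rewrite author's own statement) =====
-- stated objective: faster
-- what changed: A materialises all n rotations (each tagged with its start index), sorts the list of lists and takes the head; B makes a single running-minimum pass over the rotations, keeping the lexicographically smallest one (first index wins ties), with no options list and no sort.
import Mathlib
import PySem

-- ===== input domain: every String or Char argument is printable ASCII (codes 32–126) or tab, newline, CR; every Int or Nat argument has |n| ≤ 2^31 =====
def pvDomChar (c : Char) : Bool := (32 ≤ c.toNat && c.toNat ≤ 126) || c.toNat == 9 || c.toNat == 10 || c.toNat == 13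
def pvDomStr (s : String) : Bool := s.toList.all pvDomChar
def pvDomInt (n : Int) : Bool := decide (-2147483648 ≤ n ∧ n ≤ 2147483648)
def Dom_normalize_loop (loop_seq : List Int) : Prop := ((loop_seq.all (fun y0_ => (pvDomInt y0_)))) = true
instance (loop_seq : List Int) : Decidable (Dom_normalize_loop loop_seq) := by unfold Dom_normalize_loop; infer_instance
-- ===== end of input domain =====

-- B replaces A's build-all-rotations-then-sort (O(n² log n) comparisons of O(n) lists) by a single
-- running-minimum pass over the rotations (alternative algorithm; no options list, no sort).

-- ===== PORT A =====
-- inner helper invert_pos of A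
def pvInvertPos (loop_seq : List Int) (pos : Int) : Int :=
  if pos > 0 then PySem.List.len loop_seq - pos else 0

def normalize_loop (loop_seq : List Int) : List Int × Int :=
  let options := (PySem.List.pyRange 0 (PySem.List.len loop_seq) 1).foldl
    (fun acc start_index =>
      acc ++ [PySem.List.slice loop_seq (some start_index) none ++
              PySem.List.slice loop_seq none (some start_index) ++ [start_index]]) []
  let options := PySem.List.sorted options (fun x => x) false
  -- options[0] raises IndexError on the empty input: excluded by Pre_ (loop_seq ≠ [])
  (PySem.List.slice (PySem.List.pyGetD options 0 []) none (some (-1)),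
   pvInvertPos loop_seq (PySem.List.pyGetD (PySem.List.pyGetD options 0 []) (-1) 0))

-- ===== PORT B =====
def normalize_loop_alt (loop_seq : List Int) : List Int × Int :=
  let n := PySem.List.len loop_seq
  let st := (PySem.List.pyRange 1 n 1).foldl
    (fun st i =>
      let cand := PySem.List.slice loop_seq (some i) none ++
                  PySem.List.slice loop_seq none (some i)
      if cand < st.2 then (i, cand) else st) ((0 : Int), loop_seq)
  (st.2, if st.1 > 0 then n - st.1 else 0)

-- ===== PRECONDITION & SPEC =====
-- Pre_ excludes only the empty list, on which A raises IndexError (options[0] of an empty list).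
def Pre_normalize_loop (loop_seq : List Int) : Prop := loop_seq ≠ []
instance (loop_seq : List Int) : Decidable (Pre_normalize_loop loop_seq) := by
  unfold Pre_normalize_loop; infer_instance
def pvWitness_normalize_loop : List Int := [3, 1, 2, 1]

def Spec_normalize_loop (loop_seq : List Int) (out : List Int × Int) : Prop :=
  out = normalize_loop_alt loop_seq
instance (loop_seq : List Int) (out : List Int × Int) : Decidable (Spec_normalize_loop loop_seq out) := by
  unfold Spec_normalize_loop; infer_instance

-- ===== CLAIM (what is proved, stated in full; the proofs are below) =====
def Claim_equal_normalize_loop : Prop := ∀ (loop_seq : List Int), Dom_normalize_loop loop_seq →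
  Pre_normalize_loop loop_seq → Spec_normalize_loop loop_seq (normalize_loop loop_seq)

-- ===== LEMMAS AND PROOFS =====

-- rotation of xs starting at position k, and A's sort key for it (rotation with the index appended)
def pvRot (xs : List Int) (k : Nat) : List Int := xs.drop k ++ xs.take k
def pvTag (xs : List Int) (k : Nat) : List Int := pvRot xs k ++ [(k : Int)]

lemma pvRot_length (xs : List Int) (k : Nat) : (pvRot xs k).length = xs.length := by
  simp [pvRot]; omega

lemma pvRot_zero (xs : List Int) : pvRot xs 0 = xs := by simp [pvRot]

-- lexicographic comparison with one element appended to lists of equal length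
lemma pvLexAppend {a b : List Int} (x y : Int) (h : a.length = b.length) :
    a ++ [x] < b ++ [y] ↔ a < b ∨ (a = b ∧ x < y) := by
  induction a generalizing b with
  | nil =>
    cases b with
    | nil => simp [List.cons_lt_cons_iff]
    | cons q b => simp at h
  | cons p a ih =>
    cases b with
    | nil => simp at h
    | cons q b =>
      simp only [List.cons_append, List.cons_lt_cons_iff, List.cons.injEq]
      rw [ih (by simpa using h)]
      tauto

lemma pvTag_lt_iff (xs : List Int) (a b : Nat) :
    pvTag xs a < pvTag xs b ↔ pvRot xs a < pvRot xs b ∨ (pvRot xs a = pvRot xs b ∧ a < b) := by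
  unfold pvTag
  rw [pvLexAppend _ _ (by rw [pvRot_length, pvRot_length])]
  constructor
  · rintro (h | ⟨h1, h2⟩)
    · exact Or.inl h
    · exact Or.inr ⟨h1, by exact_mod_cast h2⟩
  · rintro (h | ⟨h1, h2⟩)
    · exact Or.inl h
    · exact Or.inr ⟨h1, by exact_mod_cast h2⟩

lemma pvStep_rot (xs : List Int) (k : Nat) :
    PySem.List.slice xs (some (k : Int)) none ++ PySem.List.slice xs none (some (k : Int)) =
      pvRot xs k := by
  rw [PySem.List.slice_from_natCast, PySem.List.slice_to_natCast]; rfl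

-- invariant of B's running-minimum fold over the indices 1, …, k-1
lemma pvB_inv (xs : List Int) (k : Nat) (hk : 1 ≤ k) :
    ∃ bi : Nat, bi < k ∧
      (PySem.List.pyRange 1 (k : Int)).foldl
        (fun st i =>
          if PySem.List.slice xs (some i) none ++ PySem.List.slice xs none (some i) < st.2
          then (i, PySem.List.slice xs (some i) none ++ PySem.List.slice xs none (some i))
          else st) ((0 : Int), xs)
        = ((bi : Int), pvRot xs bi) ∧
      ∀ j : Nat, j < k → pvTag xs bi ≤ pvTag xs j := by
  induction k with
  | zero => omega
  | succ k ih =>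
    by_cases hk1 : k = 0
    · subst hk1
      refine ⟨0, by omega, ?_, ?_⟩
      · have : PySem.List.pyRange 1 ((1 : Nat) : Int) = [] := by decide
        rw [show ((1 : Nat) : Int) = (1 : Int) by norm_num] at *
        simp [this, pvRot_zero]
      · intro j hj; interval_cases j; exact le_refl _
    · have hk' : 1 ≤ k := by omega
      obtain ⟨bi, hbi, hfold, hmin⟩ := ih hk'
      have hrange : PySem.List.pyRange 1 ((k + 1 : Nat) : Int) =
          PySem.List.pyRange 1 (k : Int) ++ [(k : Int)] := by
        push_cast
        exact PySem.List.pyRange_one_succ_right (by exact_mod_cast hk')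
      rw [hrange, List.foldl_append, hfold]
      simp only [List.foldl_cons, List.foldl_nil, pvStep_rot]
      by_cases hlt : pvRot xs k < pvRot xs bi
      · rw [if_pos hlt]
        refine ⟨k, by omega, rfl, ?_⟩
        intro j hj
        rcases Nat.lt_succ_iff_lt_or_eq.mp hj with hj | hj
        · have h1 : pvTag xs k < pvTag xs bi := (pvTag_lt_iff xs k bi).mpr (Or.inl hlt)
          exact le_of_lt (lt_of_lt_of_le h1 (hmin j hj))
        · subst hj; exact le_refl _
      · rw [if_neg hlt]
        refine ⟨bi, by omega, rfl, ?_⟩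
        intro j hj
        rcases Nat.lt_succ_iff_lt_or_eq.mp hj with hj | hj
        · exact hmin j hj
        · subst hj
          rcases lt_or_eq_of_le (not_lt.mp hlt) with h | h
          · exact le_of_lt ((pvTag_lt_iff xs bi j).mpr (Or.inl h))
          · exact le_of_lt ((pvTag_lt_iff xs bi j).mpr (Or.inr ⟨h, hbi⟩))

-- PySem.List.sorted does not depend on which (propositionally equal) order instance is used
lemma pvSortedIrrel (xs : List (List Int)) :
    @PySem.List.sorted (List Int) (List Int) List.instLT (fun a b => a.decidableLT b) xs
      (fun x => x) false =
    @PySem.List.sorted (List Int) (List Int) List.instLinearOrder.toLT LinearOrder.toDecidableLT xs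
      (fun x => x) false := by
  rw [@PySem.List.sorted_eq_foldl_insertBy (List Int) (List Int) List.instLT
        (fun a b => a.decidableLT b) xs (fun x => x),
      @PySem.List.sorted_eq_foldl_insertBy (List Int) (List Int) List.instLinearOrder.toLT
        LinearOrder.toDecidableLT xs (fun x => x)]
  congr 1
  funext acc x
  congr 1
  funext a b
  exact decide_eq_decide.mpr Iff.rfl

-- A's options list is the list of tagged rotations
lemma pvOptions_eq (xs : List Int) :
    (PySem.List.pyRange 0 ((xs.length : Int))).foldl
      (fun acc start_index =>
        acc ++ [PySem.List.slice xs (some start_index) none ++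
                PySem.List.slice xs none (some start_index) ++ [start_index]]) []
      = (List.range xs.length).map (pvTag xs) := by
  rw [PySem.List.pyRange_zero_natCast,
    PySem.List.foldl_append_singleton_eq_map, List.map_map]
  simp only [List.nil_append]
  apply List.map_congr_left
  intro k _
  simp only [Function.comp_apply, PySem.List.slice_from_natCast, PySem.List.slice_to_natCast]
  simp [pvTag, pvRot]

-- ===== VERDICT (by name: the statement is the Claim_ definition above) =====
theorem normalize_loop_spec : Claim_equal_normalize_loop := by
  intro xs _ hpre
  unfold Spec_normalize_loop normalize_loop normalize_loop_alt
  simp only [PySem.List.len_eq]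
  rw [pvOptions_eq]
  have hn : 1 ≤ xs.length := by
    cases xs with
    | nil => exact absurd rfl hpre
    | cons a t => simp
  obtain ⟨bi, hbi, hfold, hmin⟩ := pvB_inv xs xs.length hn
  rw [hfold]
  -- analyse the sorted options
  set options := (List.range xs.length).map (pvTag xs) with hopt
  have hne : options ≠ [] := by
    intro hcon
    rw [hopt, List.map_eq_nil_iff, List.range_eq_nil] at hcon
    omega
  rcases hsort : PySem.List.sorted options (fun x => x) false with _ | ⟨m, t⟩
  · exact absurd ((PySem.List.sorted_eq_nil_iff options (fun x => x) false).mp hsort) hne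
  have hmmem : m ∈ options := by
    have : m ∈ PySem.List.sorted options (fun x => x) false := by
      rw [hsort]; exact List.mem_cons_self
    exact (PySem.List.mem_sorted options (fun x => x) false m).mp this
  have hmle : ∀ y ∈ options, m ≤ y :=
    PySem.List.key_head_sorted_le options (fun x => x) (by rw [← pvSortedIrrel]; exact hsort)
  obtain ⟨j, hj, hjm⟩ := List.mem_map.mp hmmem
  have hjlt : j < xs.length := List.mem_range.mp hj
  have h1 : m ≤ pvTag xs bi := by
    apply hmle
    exact List.mem_map.mpr ⟨bi, List.mem_range.mpr hbi, rfl⟩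
  have h2 : pvTag xs bi ≤ m := by rw [← hjm]; exact hmin j hjlt
  have hm : m = pvTag xs bi := le_antisymm h1 h2
  rw [PySem.List.pyGetD_zero_cons, hm]
  unfold pvTag
  rw [PySem.List.slice_to_neg_one, List.dropLast_concat,
    PySem.List.pyGetD_neg_one_append_singleton]
  rfl
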